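-- pv_equiv track=rewrite | github.com/Vika41/dss-project | src/models/cooccurrence.py | build_co_matrix
-- ===== SOURCE A (Python) =====
-- from collections import defaultdict, Counter
--
-- def build_co_matrix(playlists):
--     co_matrix = defaultdict(Counter)
--     for playlist in playlists:
--         tracks = [f"{t['track_uri']}" for t in playlist['tracks']]
--         for i, t1 in enumerate(tracks):
--             for t2 in tracks[i+1:]:
--                 co_matrix[t1][t2] += 1
--                 co_matrix[t2][t1] += 1
--     return co_matrix
-- ===== SOURCE B (Python) =====
-- from collections import defaultdict, Counter
--
--
-- def build_co_matrix(playlists):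
--     # Streaming algorithm: no pair enumeration. Scan each playlist once,
--     # maintaining a Counter of the tracks seen so far; each new track is
--     # co-counted against every DISTINCT earlier track with its multiplicity,
--     # so duplicate earlier tracks cost one aggregated += c instead of c updates.
--     co_matrix = defaultdict(Counter)
--     for playlist in playlists:
--         seen = Counter()
--         for t in playlist['tracks']:
--             t2 = f"{t['track_uri']}"
--             for t1, c in seen.items():
--                 co_matrix[t1][t2] += c
--                 co_matrix[t2][t1] += c
--             seen[t2] += 1
--     return co_matrix
-- ===== Notes on version B (the rewrite author's own statement) =====
-- stated objective: alternative
-- what changed: A enumerates every positional pair (i, j>i) of each playlist and increments the nested counter twice per pair; B never enumerates pairs: it scans each playlist once keeping a Counter 'seen' of the earlier tracks, co-counting each new track against every DISTINCT earlier track with one aggregated '+= c' per direction, so duplicate-heavy playlists cost O(len * distinct) instead of O(len^2). Pre_ only excludes inputs where A raises KeyError (a playlist without 'tracks' or a track without 'track_uri'), where B raises too.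
import Mathlib
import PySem

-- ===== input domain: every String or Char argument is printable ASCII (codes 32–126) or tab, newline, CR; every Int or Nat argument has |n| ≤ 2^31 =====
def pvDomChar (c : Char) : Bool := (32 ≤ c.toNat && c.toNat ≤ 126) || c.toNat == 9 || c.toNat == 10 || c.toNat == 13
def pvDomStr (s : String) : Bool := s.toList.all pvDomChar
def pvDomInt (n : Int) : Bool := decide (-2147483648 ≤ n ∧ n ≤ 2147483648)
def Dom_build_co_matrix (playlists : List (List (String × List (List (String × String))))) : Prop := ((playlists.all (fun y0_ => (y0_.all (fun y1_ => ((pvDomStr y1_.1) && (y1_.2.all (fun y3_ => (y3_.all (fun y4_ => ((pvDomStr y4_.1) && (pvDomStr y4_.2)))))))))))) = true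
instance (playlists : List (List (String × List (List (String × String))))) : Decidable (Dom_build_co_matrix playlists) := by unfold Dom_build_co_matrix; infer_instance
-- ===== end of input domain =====

-- B replaces A's pairwise double loop (every ordered pair of positions) by a streaming
-- single scan per playlist that co-counts each new track against a Counter of the
-- distinct earlier tracks with aggregated increments (+= c); proved to build the very
-- same insertion-ordered nested counter matrix.

-- ===== PORT A =====
-- tracks = [f"{t['track_uri']}" for t in playlist['tracks']]  (lookups total via getD; Pre_ excludes the KeyError inputs)
def pvTracks (playlist : List (String × List (List (String × String)))) : List String :=
  ((PySem.Dict.mk playlist).getD "tracks" []).map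
    (fun t => (PySem.Dict.mk t).getD "track_uri" "")

def build_co_matrix (playlists : List (List (String × List (List (String × String))))) : List (String × List (String × Int)) :=
  let co :=
    playlists.foldl (fun co playlist =>
      let tracks := pvTracks playlist
      (PySem.List.enumerate tracks 0).foldl (fun co it =>
        (PySem.List.slice tracks (some (it.1 + 1)) none).foldl (fun co t2 =>
          ((co.modify it.2 PySem.Dict.empty (fun c => c.modify t2 0 (· + 1))).modify
             t2 PySem.Dict.empty (fun c => c.modify it.2 0 (· + 1)))) co) co)
      PySem.Dict.empty
  co.items.map (fun p => (p.1, p.2.items))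

-- ===== PORT B =====
-- streaming scan: 'seen' is the Counter of earlier tracks of the current playlist;
-- each new track t2 is co-counted against every distinct earlier track with weight c
def build_co_matrix_alt (playlists : List (List (String × List (List (String × String))))) : List (String × List (String × Int)) :=
  let co :=
    playlists.foldl (fun co playlist =>
      (((PySem.Dict.mk playlist).getD "tracks" []).foldl
        (fun (st : PySem.Dict String (PySem.Dict String Int) × PySem.Dict String Int) t =>
          let t2 := (PySem.Dict.mk t).getD "track_uri" ""
          (st.2.items.foldl (fun co p =>
              ((co.modify p.1 PySem.Dict.empty (fun c => c.modify t2 0 (· + p.2))).modify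
                 t2 PySem.Dict.empty (fun c => c.modify p.1 0 (· + p.2)))) st.1,
           st.2.modify t2 0 (· + 1)))
        (co, PySem.Dict.empty)).1)
      PySem.Dict.empty
  co.items.map (fun p => (p.1, p.2.items))

-- ===== PRECONDITION & SPEC =====
-- Pre_ excludes exactly the inputs where A raises KeyError: a playlist dict without a
-- "tracks" key, or a track dict without a "track_uri" key.
def Pre_build_co_matrix (playlists : List (List (String × List (List (String × String))))) : Prop :=
  (playlists.all (fun pl =>
    (PySem.Dict.mk pl).contains "tracks" &&
    ((PySem.Dict.mk pl).getD "tracks" []).all (fun t =>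
      (PySem.Dict.mk t).contains "track_uri"))) = true
instance (playlists : List (List (String × List (List (String × String))))) : Decidable (Pre_build_co_matrix playlists) := by unfold Pre_build_co_matrix; infer_instance

def pvWitness_build_co_matrix : (List (List (String × List (List (String × String))))) :=
  [[("tracks", [[("track_uri", "a")], [("track_uri", "b")], [("track_uri", "a")]])],
   [("tracks", [[("track_uri", "b")], [("track_uri", "c")]])]]

def Spec_build_co_matrix (playlists : List (List (String × List (List (String × String))))) (out : List (String × List (String × Int))) : Prop := out = build_co_matrix_alt playlists
instance (playlists : List (List (String × List (List (String × String))))) (out : List (String × List (String × Int))) : Decidable (Spec_build_co_matrix playlists out) := by unfold Spec_build_co_matrix; infer_instance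

-- ===== CLAIM (what is proved, stated in full; the proofs are below) =====
def Claim_equal_build_co_matrix : Prop := ∀ (playlists : List (List (String × List (List (String × String))))), Dom_build_co_matrix playlists → Pre_build_co_matrix playlists → Spec_build_co_matrix playlists (build_co_matrix playlists)

-- ===== LEMMAS AND PROOFS =====

-- abbreviations for the two event shapes
-- A's events: the doubled positional pairs, in A's (i,j)-lexicographic order
def pvStepE (co : PySem.Dict String (PySem.Dict String Int)) (e : String × String) :
    PySem.Dict String (PySem.Dict String Int) :=
  co.modify e.1 PySem.Dict.empty (fun c => c.modify e.2 0 (· + 1))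

def pvPairs : List String → List (String × String)
  | [] => []
  | x :: xs => xs.map (fun y => (x, y)) ++ pvPairs xs

def pvE (ts : List String) : List (String × String) :=
  (pvPairs ts).flatMap (fun p => [(p.1, p.2), (p.2, p.1)])

-- B's events: weighted (source, target, weight) triples in B's streaming order
def pvStepW (co : PySem.Dict String (PySem.Dict String Int)) (e : String × String × Int) :
    PySem.Dict String (PySem.Dict String Int) :=
  co.modify e.1 PySem.Dict.empty (fun c => c.modify e.2.1 0 (· + e.2.2))

def pvChunk (seen : PySem.Dict String Int) (t : String) : List (String × String × Int) :=
  seen.items.flatMap (fun p => [(p.1, (t, p.2)), (t, (p.1, p.2))])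

def pvW (seen : PySem.Dict String Int) : List String → List (String × String × Int)
  | [] => []
  | t :: ts => pvChunk seen t ++ pvW (seen.modify t 0 (· + 1)) ts

-- target/source projections used by the characterisations
def pvSrc (L : List (String × String)) : List String := L.map (·.1)
def pvSrcW (L : List (String × String × Int)) : List String := L.map (·.1)
def pvTgt (k : String) (L : List (String × String)) : List String :=
  (L.filter (fun e => e.1 == k)).map (·.2)
def pvTgtW (k : String) (L : List (String × String × Int)) : List String :=
  ((L.filter (fun e => e.1 == k)).map (·.2)).map (·.1)
def pvQs (k : String) (L : List (String × String × Int)) : List (String × Int) :=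
  (L.filter (fun e => e.1 == k)).map (·.2)
def pvCntE (k b : String) (L : List (String × String)) : Nat :=
  (L.filter (fun e => e.1 == k && e.2 == b)).length
def pvWsum (k b : String) (L : List (String × String × Int)) : Int :=
  ((L.filter (fun e => e.1 == k && e.2.1 == b)).map (fun e => e.2.2)).sum

theorem pv_foldl_flatMap {α β γ : Type} (l : List α) (f : α → List β)
    (g : γ → β → γ) (init : γ) :
    l.foldl (fun s a => (f a).foldl g s) init = (l.flatMap f).foldl g init := by
  induction l generalizing init with
  | nil => rfl
  | cons a l ih => simp [List.flatMap_cons, List.foldl_append, ih]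

-- ---------- reduction of port A to a pvStepE fold over pvE ----------
def pvInner (a : String) (co : PySem.Dict String (PySem.Dict String Int)) (b : String) :
    PySem.Dict String (PySem.Dict String Int) :=
  pvStepE (pvStepE co (a, b)) (b, a)

def pvBodyD (t : List String) (co : PySem.Dict String (PySem.Dict String Int))
    (it : Int × String) : PySem.Dict String (PySem.Dict String Int) :=
  (t.drop (it.1.toNat + 1)).foldl (pvInner it.2) co

theorem pv_enum_shift {α : Type} (xs : List α) (s : Int) :
    PySem.List.enumerate xs (s + 1) = (PySem.List.enumerate xs s).map (fun p => (p.1 + 1, p.2)) := by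
  induction xs generalizing s with
  | nil => simp [PySem.List.enumerate_nil]
  | cons x xs ih => simp [PySem.List.enumerate_cons, ih]

theorem pv_drop_fold (xs : List String) :
    ∀ co, (PySem.List.enumerate xs 0).foldl (pvBodyD xs) co
      = (pvPairs xs).foldl (fun co p => pvInner p.1 co p.2) co := by
  induction xs with
  | nil => intro co; rfl
  | cons x xs ih =>
    intro co
    rw [PySem.List.enumerate_cons, List.foldl_cons, pv_enum_shift, List.foldl_map]
    have h1 : pvBodyD (x :: xs) co (0, x) = xs.foldl (pvInner x) co := by
      simp [pvBodyD]
    have h2 : ∀ co', (PySem.List.enumerate xs 0).foldl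
        (fun co p => pvBodyD (x :: xs) co (p.1 + 1, p.2)) co'
        = (PySem.List.enumerate xs 0).foldl (pvBodyD xs) co' := by
      intro co'
      apply PySem.List.foldl_congr_mem
      intro acc p hp
      rcases (PySem.List.mem_enumerate_iff _ _ _).1 hp with ⟨k, hk, rfl⟩
      simp only [pvBodyD]
      have e1 : (((0 : Int) + (k : Int)) + 1).toNat + 1 = k + 2 := by omega
      have e2 : ((0 : Int) + (k : Int)).toNat + 1 = k + 1 := by omega
      rw [e1, e2]
      rfl
    rw [h1, h2, ih]
    conv_rhs => rw [show pvPairs (x :: xs) = xs.map (fun y => (x, y)) ++ pvPairs xs from rfl]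
    rw [List.foldl_append, List.foldl_map]

theorem pv_inner_eq (tracks : List String) (co : PySem.Dict String (PySem.Dict String Int)) :
    (PySem.List.enumerate tracks 0).foldl (fun co it =>
        (PySem.List.slice tracks (some (it.1 + 1)) none).foldl (fun co t2 =>
          ((co.modify it.2 PySem.Dict.empty (fun c => c.modify t2 0 (· + 1))).modify
             t2 PySem.Dict.empty (fun c => c.modify it.2 0 (· + 1)))) co) co
      = (pvE tracks).foldl pvStepE co := by
  unfold pvE
  rw [← pv_foldl_flatMap]
  have hsl : (PySem.List.enumerate tracks 0).foldl (fun co it =>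
        (PySem.List.slice tracks (some (it.1 + 1)) none).foldl (fun co t2 =>
          ((co.modify it.2 PySem.Dict.empty (fun c => c.modify t2 0 (· + 1))).modify
             t2 PySem.Dict.empty (fun c => c.modify it.2 0 (· + 1)))) co) co
      = (PySem.List.enumerate tracks 0).foldl (pvBodyD tracks) co := by
    apply PySem.List.foldl_congr_mem
    intro acc it hmem
    rcases (PySem.List.mem_enumerate_iff _ _ _).1 hmem with ⟨k, hk, rfl⟩
    have e1 : ((0 : Int) + (k : Int)) + 1 = ((k + 1 : Nat) : Int) := by push_cast; ring
    rw [e1, PySem.List.slice_from_natCast]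
    simp only [pvBodyD]
    have e2 : ((0 : Int) + (k : Int)).toNat + 1 = k + 1 := by omega
    rw [e2]
    rfl
  rw [hsl, pv_drop_fold]
  rfl

theorem pv_A_fold (playlists : List (List (String × List (List (String × String))))) :
    (playlists.foldl (fun co playlist =>
      (PySem.List.enumerate (pvTracks playlist) 0).foldl (fun co it =>
        (PySem.List.slice (pvTracks playlist) (some (it.1 + 1)) none).foldl (fun co t2 =>
          ((co.modify it.2 PySem.Dict.empty (fun c => c.modify t2 0 (· + 1))).modify
             t2 PySem.Dict.empty (fun c => c.modify it.2 0 (· + 1)))) co) co)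
      PySem.Dict.empty)
    = (playlists.flatMap (fun pl => pvE (pvTracks pl))).foldl pvStepE PySem.Dict.empty := by
  rw [← pv_foldl_flatMap]
  apply PySem.List.foldl_congr_mem
  intro co pl _
  exact pv_inner_eq (pvTracks pl) co

-- ---------- reduction of port B to a pvStepW fold over pvW ----------
theorem pv_B_fold (ts : List String) :
    ∀ (co : PySem.Dict String (PySem.Dict String Int)) (seen : PySem.Dict String Int),
    (ts.foldl
      (fun (st : PySem.Dict String (PySem.Dict String Int) × PySem.Dict String Int) t2 =>
        (st.2.items.foldl (fun co p =>
            ((co.modify p.1 PySem.Dict.empty (fun c => c.modify t2 0 (· + p.2))).modify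
               t2 PySem.Dict.empty (fun c => c.modify p.1 0 (· + p.2)))) st.1,
         st.2.modify t2 0 (· + 1)))
      (co, seen)).1
    = (pvW seen ts).foldl pvStepW co := by
  induction ts with
  | nil => intro co seen; rfl
  | cons t ts ih =>
    intro co seen
    rw [List.foldl_cons, ih, show pvW seen (t :: ts) = pvChunk seen t ++ pvW (seen.modify t 0 (· + 1)) ts from rfl,
        List.foldl_append]
    congr 1
    unfold pvChunk
    rw [← pv_foldl_flatMap]
    rfl

theorem pv_B_fold_all (playlists : List (List (String × List (List (String × String))))) :
    (playlists.foldl (fun co playlist =>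
      (((PySem.Dict.mk playlist).getD "tracks" []).foldl
        (fun (st : PySem.Dict String (PySem.Dict String Int) × PySem.Dict String Int) t =>
          let t2 := (PySem.Dict.mk t).getD "track_uri" ""
          (st.2.items.foldl (fun co p =>
              ((co.modify p.1 PySem.Dict.empty (fun c => c.modify t2 0 (· + p.2))).modify
                 t2 PySem.Dict.empty (fun c => c.modify p.1 0 (· + p.2)))) st.1,
           st.2.modify t2 0 (· + 1)))
        (co, PySem.Dict.empty)).1)
      PySem.Dict.empty)
    = (playlists.flatMap (fun pl => pvW PySem.Dict.empty (pvTracks pl))).foldl pvStepW PySem.Dict.empty := by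
  rw [← pv_foldl_flatMap]
  apply PySem.List.foldl_congr_mem
  intro co pl _
  have h := pv_B_fold (((PySem.Dict.mk pl).getD "tracks" []).map
      (fun t => (PySem.Dict.mk t).getD "track_uri" "")) co PySem.Dict.empty
  rw [List.foldl_map] at h
  exact h

-- ---------- keys / rows of the two folds ----------
theorem pv_keysE (E : List (String × String)) (d : PySem.Dict String (PySem.Dict String Int)) :
    (E.foldl pvStepE d).keys = PySem.Set.update d.keys (pvSrc E) := by
  have h : E.foldl pvStepE d
      = E.foldl (fun d x => d.modify ((fun (e : String × String) => e.1) x) PySem.Dict.empty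
          ((fun (_ : PySem.Dict String (PySem.Dict String Int)) (e : String × String) =>
            (fun (c : PySem.Dict String Int) => c.modify e.2 0 (· + 1))) d x)) d := by
    apply PySem.List.foldl_congr_mem; intro acc x _; rfl
  rw [h]
  exact PySem.Dict.keys_foldl_modify_key E _ _ _ d

theorem pv_nodupE (E : List (String × String)) (d : PySem.Dict String (PySem.Dict String Int))
    (hd : d.keys.Nodup) : (E.foldl pvStepE d).keys.Nodup := by
  have h : E.foldl pvStepE d
      = E.foldl (fun d x => d.modify ((fun (e : String × String) => e.1) x) PySem.Dict.empty
          ((fun (_ : PySem.Dict String (PySem.Dict String Int)) (e : String × String) =>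
            (fun (c : PySem.Dict String Int) => c.modify e.2 0 (· + 1))) d x)) d := by
    apply PySem.List.foldl_congr_mem; intro acc x _; rfl
  rw [h]
  exact PySem.Dict.nodup_keys_foldl_modify_key E _ _ _ d hd

theorem pv_keysW (W : List (String × String × Int)) (d : PySem.Dict String (PySem.Dict String Int)) :
    (W.foldl pvStepW d).keys = PySem.Set.update d.keys (pvSrcW W) := by
  have h : W.foldl pvStepW d
      = W.foldl (fun d x => d.modify ((fun (e : String × String × Int) => e.1) x) PySem.Dict.empty
          ((fun (_ : PySem.Dict String (PySem.Dict String Int)) (e : String × String × Int) =>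
            (fun (c : PySem.Dict String Int) => c.modify e.2.1 0 (· + e.2.2))) d x)) d := by
    apply PySem.List.foldl_congr_mem; intro acc x _; rfl
  rw [h]
  exact PySem.Dict.keys_foldl_modify_key W _ _ _ d

theorem pv_nodupW (W : List (String × String × Int)) (d : PySem.Dict String (PySem.Dict String Int))
    (hd : d.keys.Nodup) : (W.foldl pvStepW d).keys.Nodup := by
  have h : W.foldl pvStepW d
      = W.foldl (fun d x => d.modify ((fun (e : String × String × Int) => e.1) x) PySem.Dict.empty
          ((fun (_ : PySem.Dict String (PySem.Dict String Int)) (e : String × String × Int) =>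
            (fun (c : PySem.Dict String Int) => c.modify e.2.1 0 (· + e.2.2))) d x)) d := by
    apply PySem.List.foldl_congr_mem; intro acc x _; rfl
  rw [h]
  exact PySem.Dict.nodup_keys_foldl_modify_key W _ _ _ d hd

theorem pv_getD_E (E : List (String × String)) (k : String) :
    ∀ (d : PySem.Dict String (PySem.Dict String Int)),
    (E.foldl pvStepE d).getD k PySem.Dict.empty
      = (pvTgt k E).foldl (fun c y => c.modify y 0 (· + 1)) (d.getD k PySem.Dict.empty) := by
  induction E with
  | nil => intro d; rfl
  | cons e E ih =>
    intro d
    rw [List.foldl_cons, ih]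
    by_cases h : e.1 = k
    · subst h
      simp [pvTgt, pvStepE, PySem.Dict.getD_modify_self]
    · have hb : (e.1 == k) = false := by simp [h]
      simp only [pvTgt, List.filter_cons, hb, Bool.false_eq_true, if_false]
      rw [show (pvStepE d e).getD k PySem.Dict.empty = d.getD k PySem.Dict.empty from
        PySem.Dict.getD_modify_of_ne _ _ _ (fun hkk => h hkk.symm)]

theorem pv_getD_W (W : List (String × String × Int)) (k : String) :
    ∀ (d : PySem.Dict String (PySem.Dict String Int)),
    (W.foldl pvStepW d).getD k PySem.Dict.empty
      = (pvQs k W).foldl (fun c q => c.modify q.1 0 (· + q.2)) (d.getD k PySem.Dict.empty) := by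
  induction W with
  | nil => intro d; rfl
  | cons e W ih =>
    intro d
    rw [List.foldl_cons, ih]
    by_cases h : e.1 = k
    · subst h
      simp [pvQs, pvStepW, PySem.Dict.getD_modify_self]
    · have hb : (e.1 == k) = false := by simp [h]
      simp only [pvQs, List.filter_cons, hb, Bool.false_eq_true, if_false]
      rw [show (pvStepW d e).getD k PySem.Dict.empty = d.getD k PySem.Dict.empty from
        PySem.Dict.getD_modify_of_ne _ _ _ (fun hkk => h hkk.symm)]

-- inner-row characterisations
theorem pv_row1_keys (ys : List String) :
    ((ys.foldl (fun c y => c.modify y 0 (· + 1)) (PySem.Dict.empty : PySem.Dict String Int))).keys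
      = PySem.Set.ofList ys := by
  rw [← PySem.Dict.counter_eq_foldl]
  exact PySem.Dict.keys_counter ys

theorem pv_row1_nodup (ys : List String) :
    ((ys.foldl (fun c y => c.modify y 0 (· + 1)) (PySem.Dict.empty : PySem.Dict String Int))).keys.Nodup := by
  rw [← PySem.Dict.counter_eq_foldl]
  exact PySem.Dict.nodup_keys_counter ys

theorem pv_row1_getD (ys : List String) (b : String) :
    ((ys.foldl (fun c y => c.modify y 0 (· + 1)) (PySem.Dict.empty : PySem.Dict String Int))).getD b 0
      = (ys.count b : Int) := by
  rw [← PySem.Dict.counter_eq_foldl]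
  exact PySem.Dict.getD_counter ys b

theorem pv_row2_keys (qs : List (String × Int)) :
    ((qs.foldl (fun c q => c.modify q.1 0 (· + q.2)) (PySem.Dict.empty : PySem.Dict String Int))).keys
      = PySem.Set.ofList (qs.map (·.1)) := by
  have h : qs.foldl (fun c q => c.modify q.1 0 (· + q.2)) PySem.Dict.empty
      = qs.foldl (fun d x => d.modify ((fun (q : String × Int) => q.1) x) 0
          ((fun (_ : PySem.Dict String Int) (q : String × Int) =>
            (fun (v : Int) => v + q.2)) d x)) PySem.Dict.empty := by
    apply PySem.List.foldl_congr_mem; intro acc x _; rfl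
  rw [h, PySem.Dict.keys_foldl_modify_key]
  simp [PySem.Dict.keys_empty, PySem.Set.update_nil_left]

theorem pv_row2_nodup (qs : List (String × Int)) :
    ((qs.foldl (fun c q => c.modify q.1 0 (· + q.2)) (PySem.Dict.empty : PySem.Dict String Int))).keys.Nodup := by
  have h : qs.foldl (fun c q => c.modify q.1 0 (· + q.2)) PySem.Dict.empty
      = qs.foldl (fun d x => d.modify ((fun (q : String × Int) => q.1) x) 0
          ((fun (_ : PySem.Dict String Int) (q : String × Int) =>
            (fun (v : Int) => v + q.2)) d x)) PySem.Dict.empty := by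
    apply PySem.List.foldl_congr_mem; intro acc x _; rfl
  rw [h]
  exact PySem.Dict.nodup_keys_foldl_modify_key qs _ _ _ _ (by simp [PySem.Dict.keys_empty])

theorem pv_row2_getD (qs : List (String × Int)) (b : String) :
    ∀ (c : PySem.Dict String Int),
    ((qs.foldl (fun c q => c.modify q.1 0 (· + q.2)) c)).getD b 0
      = c.getD b 0 + ((qs.filter (fun q => q.1 == b)).map (·.2)).sum := by
  induction qs with
  | nil => intro c; simp
  | cons q qs ih =>
    intro c
    rw [List.foldl_cons, ih]
    by_cases h : q.1 = b
    · subst h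
      simp [PySem.Dict.getD_modify_self]
      ring
    · have hb : (q.1 == b) = false := by simp [h]
      simp only [List.filter_cons, hb, Bool.false_eq_true, if_false]
      rw [PySem.Dict.getD_modify_of_ne _ _ _ (fun hkk => h hkk.symm)]


-- ---------- Set-level utilities ----------
theorem pv_keys_eq_items {ν : Type} (d : PySem.Dict String ν) : d.keys = d.items.map (·.1) := rfl

theorem pv_upd_absorb (L : List String) : ∀ (s : PySem.Set String), (∀ x ∈ L, x ∈ s) →
    PySem.Set.update s L = s := by
  induction L with
  | nil => intro s _; exact PySem.Set.update_nil s
  | cons x L ih =>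
    intro s h
    rw [PySem.Set.update_cons, PySem.Set.add_of_mem (h x (by simp))]
    exact ih s (fun y hy => h y (by simp [hy]))

theorem pv_upd_addArg (L : List String) (t : String) (s : PySem.Set String) :
    PySem.Set.update s (PySem.Set.add L t) = PySem.Set.add (PySem.Set.update s L) t := by
  by_cases h : t ∈ L
  · rw [PySem.Set.add_of_mem h, PySem.Set.add_of_mem ((PySem.Set.mem_update s L t).2 (Or.inr h))]
  · have hc : L.contains t = false := by
      rw [← Bool.not_eq_true]; simpa using h
    have : PySem.Set.add L t = L ++ [t] := by
      unfold PySem.Set.add; rw [if_neg (by simpa using h)]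
    rw [this, PySem.Set.update_append, PySem.Set.update_cons, PySem.Set.update_nil]

theorem pv_upd_mostmem (k : String) (L : List String) : ∀ (s : PySem.Set String),
    (∀ y ∈ L, y ≠ k → y ∈ s) → k ∈ L → PySem.Set.update s L = PySem.Set.add s k := by
  induction L with
  | nil => intro s _ h; cases h
  | cons y L ih =>
    intro s hmem hk
    rw [PySem.Set.update_cons]
    by_cases hy : y = k
    · subst hy
      apply pv_upd_absorb
      intro x hx
      by_cases hxk : x = y
      · subst hxk; exact (PySem.Set.mem_add s x x).2 (Or.inr rfl)
      · exact (PySem.Set.mem_add s y x).2 (Or.inl (hmem x (by simp [hx]) hxk))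
    · rw [PySem.Set.add_of_mem (hmem y (by simp) hy)]
      refine ih s (fun z hz => hmem z (by simp [hz])) ?_
      rcases List.mem_cons.1 hk with rfl | hk'
      · exact absurd rfl hy
      · exact hk'

-- ---------- A-side source structure ----------
theorem pv_pvE_cons (t : String) (ts : List String) :
    pvE (t :: ts) = ts.flatMap (fun y => [(t, y), (y, t)]) ++ pvE ts := by
  show ((ts.map (fun y => (t, y)) ++ pvPairs ts).flatMap _) = _
  rw [List.flatMap_append]
  congr 1
  induction ts with
  | nil => rfl
  | cons y ts ih => simp [List.flatMap_cons, ih]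

theorem pv_mem_pvPairs (ts : List String) (p : String × String) :
    p ∈ pvPairs ts → p.1 ∈ ts ∧ p.2 ∈ ts := by
  induction ts with
  | nil => intro h; cases h
  | cons x xs ih =>
    intro h
    rw [show pvPairs (x :: xs) = xs.map (fun y => (x, y)) ++ pvPairs xs from rfl] at h
    rcases List.mem_append.1 h with h | h
    · rcases List.mem_map.1 h with ⟨y, hy, rfl⟩
      exact ⟨by simp, by simp [hy]⟩
    · exact ⟨by simp [(ih h).1], by simp [(ih h).2]⟩

theorem pv_mem_pvE (ts : List String) (e : String × String) :
    e ∈ pvE ts → e.1 ∈ ts ∧ e.2 ∈ ts := by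
  intro h
  rcases List.mem_flatMap.1 h with ⟨p, hp, he⟩
  have := pv_mem_pvPairs ts p hp
  simp only [List.mem_cons] at he
  rcases he with rfl | rfl | h'
  · exact ⟨this.1, this.2⟩
  · exact ⟨this.2, this.1⟩
  · cases h'

theorem pv_upd_flat_pair (t : String) (L : List String) : ∀ (s : PySem.Set String), t ∈ s →
    PySem.Set.update s (L.flatMap fun y => [t, y]) = PySem.Set.update s L := by
  induction L with
  | nil => intro s _; rfl
  | cons y L ih =>
    intro s ht
    rw [List.flatMap_cons, show ([t, y] : List String) ++ L.flatMap (fun y => [t, y])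
          = t :: y :: L.flatMap (fun y => [t, y]) from rfl,
        PySem.Set.update_cons, PySem.Set.update_cons, PySem.Set.add_of_mem ht,
        PySem.Set.update_cons]
    exact ih (s.add y) ((PySem.Set.mem_add s y t).2 (Or.inl ht))

theorem pv_srcE_cons2 (t u : String) (rest : List String) (s : PySem.Set String) :
    PySem.Set.update s (pvSrc (pvE (t :: u :: rest))) = PySem.Set.update s (t :: u :: rest) := by
  rw [pv_pvE_cons]
  unfold pvSrc
  rw [List.map_append, PySem.Set.update_append]
  have hchunk : ((u :: rest).flatMap (fun y => [(t, y), (y, t)])).map (·.1)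
      = (u :: rest).flatMap (fun y => [t, y]) := by
    simp [List.map_flatMap]
  rw [hchunk, List.flatMap_cons,
      show ([t, u] : List String) ++ rest.flatMap (fun y => [t, y])
        = t :: u :: rest.flatMap (fun y => [t, y]) from rfl,
      PySem.Set.update_cons, PySem.Set.update_cons,
      pv_upd_flat_pair t rest _ ((PySem.Set.mem_add _ u t).2 (Or.inl (by
        exact (PySem.Set.mem_add s t t).2 (Or.inr rfl))))]
  rw [pv_upd_absorb]
  · rw [PySem.Set.update_cons, PySem.Set.update_cons]
  · intro x hx
    rcases List.mem_map.1 hx with ⟨e, he, rfl⟩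
    have h1 := (pv_mem_pvE _ e he).1
    have hsub : ∀ z ∈ (u :: rest), z ∈ PySem.Set.update ((s.add t).add u) rest := by
      intro z hz
      rcases List.mem_cons.1 hz with rfl | hz
      · exact (PySem.Set.mem_update _ rest z).2 (Or.inl ((PySem.Set.mem_add _ z z).2 (Or.inr rfl)))
      · exact (PySem.Set.mem_update _ rest z).2 (Or.inr hz)
    exact hsub _ h1


-- ---------- B-side source structure ----------
theorem pv_keys_modify_add (d : PySem.Dict String Int) (k : String) (f : Int → Int) :
    (d.modify k 0 f).keys = PySem.Set.add d.keys k := by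
  rw [PySem.Dict.keys_modify]
  by_cases h : d.contains k = true
  · rw [PySem.Dict.keys_insert_of_contains d _ h,
        PySem.Set.add_of_mem ((PySem.Dict.contains_iff_mem_keys d k).1 h)]
  · rw [PySem.Dict.keys_insert_of_not_contains d _ (by revert h; cases d.contains k <;> simp)]
    have hk : k ∉ d.keys := fun hm => h ((PySem.Dict.contains_iff_mem_keys d k).2 hm)
    unfold PySem.Set.add
    rw [if_neg (by simpa using hk)]

theorem pv_chunk_src (seen : PySem.Dict String Int) (t : String) :
    (pvChunk seen t).map (·.1) = seen.items.flatMap (fun p => [p.1, t]) := by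
  simp [pvChunk, List.map_flatMap]

theorem pv_srcW_append (X Y : List (String × String × Int)) :
    pvSrcW (X ++ Y) = pvSrcW X ++ pvSrcW Y := List.map_append

theorem pv_srcW_chunk (seen : PySem.Dict String Int) (t : String) :
    pvSrcW (pvChunk seen t) = seen.items.flatMap (fun p => [p.1, t]) := pv_chunk_src seen t

theorem pv_upd_ps_src (t : String) (ps : List (String × Int)) : ∀ (s : PySem.Set String),
    ps ≠ [] → (∀ p ∈ ps, p.1 ∈ s) →
    PySem.Set.update s (ps.flatMap (fun p => [p.1, t])) = PySem.Set.add s t := by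
  induction ps with
  | nil => intro s h _; exact absurd rfl h
  | cons p ps ih =>
    intro s _ hmem
    rw [List.flatMap_cons, show ([p.1, t] : List String) ++ ps.flatMap (fun p => [p.1, t])
          = p.1 :: t :: ps.flatMap (fun p => [p.1, t]) from rfl,
        PySem.Set.update_cons, PySem.Set.update_cons,
        PySem.Set.add_of_mem (hmem p (by simp))]
    rcases ps with _ | ⟨q, qs⟩
    · exact PySem.Set.update_nil _
    · rw [ih (s.add t) (by simp) (fun r hr => (PySem.Set.mem_add s t r.1).2
        (Or.inl (hmem r (by simp [hr])))),
        PySem.Set.add_of_mem ((PySem.Set.mem_add s t t).2 (Or.inr rfl))]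

theorem pv_srcW_lemma (ts : List String) : ∀ (seen : PySem.Dict String Int) (s : PySem.Set String),
    seen.keys ≠ [] → (∀ a ∈ seen.keys, a ∈ s) →
    PySem.Set.update s (pvSrcW (pvW seen ts)) = PySem.Set.update s ts := by
  induction ts with
  | nil => intro seen s _ _; rfl
  | cons t ts ih =>
    intro seen s hne hmem
    rw [show pvW seen (t :: ts) = pvChunk seen t ++ pvW (seen.modify t 0 (· + 1)) ts from rfl,
        pv_srcW_append, PySem.Set.update_append]
    have hitems : seen.items ≠ [] := by
      intro h; apply hne; rw [pv_keys_eq_items, h]; rfl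
    have hchunk : PySem.Set.update s (pvSrcW (pvChunk seen t)) = PySem.Set.add s t := by
      rw [pv_srcW_chunk]
      exact pv_upd_ps_src t seen.items s hitems
        (fun p hp => hmem p.1 (by rw [pv_keys_eq_items]; exact List.mem_map.2 ⟨p, hp, rfl⟩))
    rw [hchunk]
    have hkeys' : (seen.modify t 0 (· + 1)).keys = PySem.Set.add seen.keys t :=
      pv_keys_modify_add seen t _
    have hne' : (seen.modify t 0 (· + 1)).keys ≠ [] := by
      rw [hkeys']
      unfold PySem.Set.add
      split <;> simp [hne]
    have hmem' : ∀ a ∈ (seen.modify t 0 (· + 1)).keys, a ∈ s.add t := by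
      intro a ha
      rw [hkeys'] at ha
      rcases (PySem.Set.mem_add seen.keys t a).1 ha with ha | rfl
      · exact (PySem.Set.mem_add s t a).2 (Or.inl (hmem a ha))
      · exact (PySem.Set.mem_add s a a).2 (Or.inr rfl)
    rw [ih _ _ hne' hmem', PySem.Set.update_cons]

theorem pv_seen1_items (t : String) :
    ((PySem.Dict.empty : PySem.Dict String Int).modify t 0 (· + 1)).items = [(t, (1 : Int))] := by
  have hkeys : ((PySem.Dict.empty : PySem.Dict String Int).modify t 0 (· + 1)).keys = [t] := by
    rw [pv_keys_modify_add, PySem.Dict.keys_empty]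
    rfl
  rw [PySem.Dict.items_eq_map_keys _ (by rw [hkeys]; simp) 0, hkeys]
  simp [PySem.Dict.getD_modify_self, PySem.Dict.getD_empty]

theorem pv_src_play (ts : List String) (s : PySem.Set String) :
    PySem.Set.update s (pvSrc (pvE ts)) = PySem.Set.update s (pvSrcW (pvW PySem.Dict.empty ts)) := by
  match ts with
  | [] => rfl
  | [t] =>
    show PySem.Set.update s (pvSrc (pvE [t]))
      = PySem.Set.update s (pvSrcW (pvChunk PySem.Dict.empty t ++ pvW _ []))
    rw [show pvChunk PySem.Dict.empty t = [] from rfl]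
    rfl
  | t :: u :: rest =>
    rw [pv_srcE_cons2]
    rw [show pvW PySem.Dict.empty (t :: u :: rest)
        = pvChunk PySem.Dict.empty t ++ (pvChunk (PySem.Dict.empty.modify t 0 (· + 1)) u
            ++ pvW ((PySem.Dict.empty.modify t 0 (· + 1)).modify u 0 (· + 1)) rest) from rfl,
        show pvChunk PySem.Dict.empty t = [] from rfl, List.nil_append]
    rw [pv_srcW_append, PySem.Set.update_append]
    have hch : pvSrcW (pvChunk ((PySem.Dict.empty : PySem.Dict String Int).modify t 0 (· + 1)) u) = [t, u] := by
      rw [pv_srcW_chunk, pv_seen1_items]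
      rfl
    rw [hch]
    have hkeys2 : (((PySem.Dict.empty : PySem.Dict String Int).modify t 0 (· + 1)).modify u 0 (· + 1)).keys
        = PySem.Set.add [t] u := by
      rw [pv_keys_modify_add, pv_keys_modify_add, PySem.Dict.keys_empty]
      rfl
    have hupdtu : PySem.Set.update s [t, u] = (s.add t).add u := by
      rw [PySem.Set.update_cons, PySem.Set.update_cons, PySem.Set.update_nil]
    rw [pv_srcW_lemma rest _ _ (by rw [hkeys2]; unfold PySem.Set.add; split <;> simp) ?memb]
    · rw [hupdtu, PySem.Set.update_cons, PySem.Set.update_cons]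
    · intro a ha
      rw [hkeys2] at ha
      rcases (PySem.Set.mem_add ([t] : PySem.Set String) u a).1 ha with ha | rfl
      · simp only [List.mem_singleton] at ha
        subst ha
        rw [hupdtu]
        exact (PySem.Set.mem_add _ u a).2 (Or.inl ((PySem.Set.mem_add s a a).2 (Or.inr rfl)))
      · rw [hupdtu]
        exact (PySem.Set.mem_add _ a a).2 (Or.inr rfl)


-- ---------- A-side rows ----------
theorem pv_tgt_append (k : String) (X Y : List (String × String)) :
    pvTgt k (X ++ Y) = pvTgt k X ++ pvTgt k Y := by
  unfold pvTgt; rw [List.filter_append, List.map_append]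

theorem pv_fm_flat {α β γ : Type} (L : List α) (f : α → List β) (P : β → Bool) (g : β → γ) :
    ((L.flatMap f).filter P).map g = L.flatMap (fun y => (((f y).filter P).map g)) := by
  induction L with
  | nil => rfl
  | cons y L ih => rw [List.flatMap_cons, List.filter_append, List.map_append, ih, List.flatMap_cons]

theorem pv_tgt_chunkE (k t : String) (ts : List String) :
    pvTgt k (ts.flatMap (fun y => [(t, y), (y, t)]))
      = ts.flatMap (fun y => (if t == k then [y] else []) ++ (if y == k then [t] else [])) := by
  unfold pvTgt
  rw [pv_fm_flat]
  have h : ∀ y : String, ((([(t, y), (y, t)] : List (String × String)).filter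
        (fun e => e.1 == k)).map (·.2))
      = (if t == k then [y] else []) ++ (if y == k then [t] else []) := by
    intro y
    by_cases h1 : t = k <;> by_cases h2 : y = k <;> simp [h1, h2]
  simp only [h]

theorem pv_upd_dupflat (k : String) (L : List String) : ∀ (s : PySem.Set String),
    PySem.Set.update s (L.flatMap (fun y => y :: (if y == k then [k] else []))) = PySem.Set.update s L := by
  induction L with
  | nil => intro s; rfl
  | cons y L ih =>
    intro s
    rw [List.flatMap_cons]
    by_cases h : y = k
    · subst h
      simp only [BEq.rfl, if_pos]
      rw [show (y :: [y]) ++ L.flatMap (fun z => z :: (if z == y then [y] else []))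
            = y :: y :: L.flatMap (fun z => z :: (if z == y then [y] else [])) from rfl,
          PySem.Set.update_cons, PySem.Set.update_cons,
          PySem.Set.add_of_mem ((PySem.Set.mem_add s y y).2 (Or.inr rfl)), ih,
          PySem.Set.update_cons]
    · have hb : (y == k) = false := by simp [h]
      rw [hb]
      simp only [if_neg Bool.false_ne_true]
      rw [show (y :: []) ++ L.flatMap (fun z => z :: (if z == k then [k] else []))
            = y :: L.flatMap (fun z => z :: (if z == k then [k] else [])) from rfl,
          PySem.Set.update_cons, ih, PySem.Set.update_cons]

theorem pv_upd_ifflat (k t : String) (L : List String) : ∀ (s : PySem.Set String),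
    (k ∈ L → PySem.Set.update s (L.flatMap (fun y => if y == k then [t] else [])) = PySem.Set.add s t)
    ∧ (k ∉ L → (L.flatMap (fun y => if y == k then [t] else [])) = []) := by
  induction L with
  | nil => intro s; exact ⟨fun h => absurd h (by simp), fun _ => rfl⟩
  | cons y L ih =>
    intro s
    constructor
    · intro hk
      rw [List.flatMap_cons]
      by_cases h : y = k
      · subst h
        simp only [BEq.rfl, if_pos]
        rw [show ([t] : List String) ++ L.flatMap (fun z => if z == y then [t] else [])
              = t :: L.flatMap (fun z => if z == y then [t] else []) from rfl,
            PySem.Set.update_cons]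
        by_cases hL : y ∈ L
        · rw [(ih (s.add t)).1 hL, PySem.Set.add_of_mem ((PySem.Set.mem_add s t t).2 (Or.inr rfl))]
        · rw [(ih (s.add t)).2 hL, PySem.Set.update_nil]
      · have hb : (y == k) = false := by simp [h]
        rw [hb]
        simp only [if_neg Bool.false_ne_true, List.nil_append]
        rcases List.mem_cons.1 hk with rfl | hk'
        · exact absurd rfl h
        · exact (ih s).1 hk'
    · intro hk
      rw [List.flatMap_cons]
      have hy : (y == k) = false := by simp; rintro rfl; exact hk (by simp)
      rw [hy]
      simp only [if_neg Bool.false_ne_true, List.nil_append]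
      exact (ih s).2 (fun h => hk (by simp [h]))

theorem pv_tgtE_nil (k : String) (ts : List String) (h : k ∉ ts) : pvTgt k (pvE ts) = [] := by
  unfold pvTgt
  have : (pvE ts).filter (fun e => e.1 == k) = [] := by
    rw [List.filter_eq_nil_iff]
    intro e he
    have := (pv_mem_pvE ts e he).1
    simp only [beq_iff_eq]
    rintro rfl
    exact h this
  rw [this]
  rfl

theorem pv_rowA_upd (k : String) (ts : List String) : ∀ (s : PySem.Set String), k ∈ ts →
    PySem.Set.update s (pvTgt k (pvE ts)) = PySem.Set.update s (ts.erase k) := by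
  induction ts with
  | nil => intro s h; cases h
  | cons t rest ih =>
    intro s hk
    rw [pv_pvE_cons, pv_tgt_append, PySem.Set.update_append, pv_tgt_chunkE]
    by_cases h : t = k
    · subst h
      simp only [BEq.rfl, if_pos]
      rw [show rest.flatMap (fun y => [y] ++ (if y == t then [t] else []))
            = rest.flatMap (fun y => y :: (if y == t then [t] else [])) from rfl, pv_upd_dupflat]
      rw [List.erase_cons_head]
      by_cases hr : t ∈ rest
      · rw [ih _ hr, pv_upd_absorb]
        intro x hx
        exact (PySem.Set.mem_update s rest x).2 (Or.inr (List.mem_of_mem_erase hx))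
      · rw [pv_tgtE_nil t rest hr, PySem.Set.update_nil]
    · have hb : (t == k) = false := by simp [h]
      rw [hb]
      simp only [if_neg Bool.false_ne_true, List.nil_append]
      have hkr : k ∈ rest := by
        rcases List.mem_cons.1 hk with rfl | hk'
        · exact absurd rfl h
        · exact hk'
      rw [(pv_upd_ifflat k t rest s).1 hkr, ih _ hkr,
          List.erase_cons_tail (by simp [h]), PySem.Set.update_cons]

theorem pv_rowA_play (k : String) (ts : List String) (s : PySem.Set String) :
    PySem.Set.update s (pvTgt k (pvE ts))
      = if k ∈ ts then PySem.Set.update s (ts.erase k) else s := by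
  by_cases h : k ∈ ts
  · rw [if_pos h, pv_rowA_upd k ts s h]
  · rw [if_neg h, pv_tgtE_nil k ts h, PySem.Set.update_nil]


-- ---------- B-side rows ----------
theorem pv_tgtW_append (k : String) (X Y : List (String × String × Int)) :
    pvTgtW k (X ++ Y) = pvTgtW k X ++ pvTgtW k Y := by
  unfold pvTgtW; rw [List.filter_append, List.map_append, List.map_append]

theorem pv_tgtW_chunk (k : String) (seen : PySem.Dict String Int) (t : String) :
    pvTgtW k (pvChunk seen t)
      = seen.items.flatMap (fun p => (if p.1 == k then [t] else []) ++ (if t == k then [p.1] else [])) := by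
  unfold pvTgtW pvChunk
  rw [pv_fm_flat, List.map_flatMap]
  apply List.flatMap_congr
  intro p _
  by_cases h1 : p.1 = k <;> by_cases h2 : t = k <;> simp [h1, h2]

theorem pv_upd_ifflatP (k t : String) (ps : List (String × Int)) : ∀ (s : PySem.Set String),
    (k ∈ ps.map (·.1) → PySem.Set.update s (ps.flatMap (fun p => if p.1 == k then [t] else [])) = PySem.Set.add s t)
    ∧ (k ∉ ps.map (·.1) → (ps.flatMap (fun p => if p.1 == k then [t] else [])) = []) := by
  induction ps with
  | nil => intro s; exact ⟨fun h => absurd h (by simp), fun _ => rfl⟩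
  | cons p ps ih =>
    intro s
    constructor
    · intro hk
      rw [List.flatMap_cons]
      by_cases h : p.1 = k
      · rw [show (p.1 == k) = true by simp [h]]
        simp only [if_pos]
        rw [show ([t] : List String) ++ ps.flatMap (fun q => if q.1 == k then [t] else [])
              = t :: ps.flatMap (fun q => if q.1 == k then [t] else []) from rfl,
            PySem.Set.update_cons]
        by_cases hL : k ∈ ps.map (·.1)
        · rw [(ih (s.add t)).1 hL, PySem.Set.add_of_mem ((PySem.Set.mem_add s t t).2 (Or.inr rfl))]
        · rw [(ih (s.add t)).2 hL, PySem.Set.update_nil]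
      · rw [show (p.1 == k) = false by simp [h]]
        simp only [if_neg Bool.false_ne_true, List.nil_append]
        rw [List.map_cons] at hk
        rcases List.mem_cons.1 hk with h' | hk'
        · exact absurd h'.symm h
        · exact (ih s).1 hk'
    · intro hk
      rw [List.flatMap_cons]
      have hp : (p.1 == k) = false := by
        simp only [beq_eq_false_iff_ne, ne_eq]
        intro h; exact hk (by simp [h])
      rw [hp]
      simp only [if_neg Bool.false_ne_true, List.nil_append]
      exact (ih s).2 (fun h => hk (by rw [List.map_cons]; exact List.mem_cons_of_mem _ h))

theorem pv_upd_dupflatP (k : String) (ps : List (String × Int)) : ∀ (s : PySem.Set String),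
    PySem.Set.update s (ps.flatMap (fun p => (if p.1 == k then [k] else []) ++ [p.1]))
      = PySem.Set.update s (ps.map (·.1)) := by
  induction ps with
  | nil => intro s; rfl
  | cons p ps ih =>
    intro s
    rw [List.flatMap_cons, List.map_cons, PySem.Set.update_append, PySem.Set.update_cons]
    by_cases h : p.1 = k
    · rw [show (p.1 == k) = true by simp [h]]
      simp only [if_pos]
      rw [show PySem.Set.update s ([k] ++ [p.1]) = (s.add k).add p.1 from by
            rw [PySem.Set.update_append, PySem.Set.update_cons, PySem.Set.update_nil,
                PySem.Set.update_cons, PySem.Set.update_nil],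
          h, PySem.Set.add_of_mem ((PySem.Set.mem_add s k k).2 (Or.inr rfl)), ih]
    · rw [show (p.1 == k) = false by simp [h]]
      simp only [if_neg Bool.false_ne_true, List.nil_append]
      rw [show PySem.Set.update s [p.1] = s.add p.1 from by
            rw [PySem.Set.update_cons, PySem.Set.update_nil], ih]

theorem pv_rowB_main (k : String) (ts : List String) :
    ∀ (seen : PySem.Dict String Int) (s : PySem.Set String), seen.keys.Nodup →
    ((k ∈ seen.keys → (∀ y ∈ seen.keys, y ≠ k → y ∈ s) →
        PySem.Set.update s (pvTgtW k (pvW seen ts)) = PySem.Set.update s ts)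
    ∧ (k ∉ seen.keys →
        PySem.Set.update s (pvTgtW k (pvW seen ts))
          = if k ∈ ts then PySem.Set.update (PySem.Set.update s seen.keys) (ts.erase k) else s)) := by
  induction ts with
  | nil =>
    intro seen s _
    exact ⟨fun _ _ => rfl, fun h => by rw [if_neg (by simp)]; rfl⟩
  | cons t ts ih =>
    intro seen s hnd
    have hw : pvW seen (t :: ts) = pvChunk seen t ++ pvW (seen.modify t 0 (· + 1)) ts := rfl
    have hkeys' : (seen.modify t 0 (· + 1)).keys = PySem.Set.add seen.keys t :=
      pv_keys_modify_add seen t _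
    have hnd' : (seen.modify t 0 (· + 1)).keys.Nodup := by
      rw [hkeys']; exact PySem.Set.nodup_add _ _ hnd
    constructor
    · intro hk hmem
      rw [hw, pv_tgtW_append, PySem.Set.update_append]
      have hchunk : PySem.Set.update s (pvTgtW k (pvChunk seen t)) = PySem.Set.add s t := by
        rw [pv_tgtW_chunk]
        by_cases ht : t = k
        · subst ht
          rw [show (t == t) = true from by simp]
          simp only [if_pos]
          rw [pv_upd_dupflatP, ← pv_keys_eq_items]
          exact pv_upd_mostmem t seen.keys s hmem hk
        · rw [show (t == k) = false from by simp [ht]]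
          simp only [if_neg Bool.false_ne_true, List.append_nil]
          exact (pv_upd_ifflatP k t seen.items s).1 (by rw [← pv_keys_eq_items]; exact hk)
      rw [hchunk]
      have hres := (ih (seen.modify t 0 (· + 1)) (s.add t) hnd').1
        (by rw [hkeys']; exact (PySem.Set.mem_add seen.keys t k).2 (Or.inl hk))
        (by
          intro y hy hyk
          rw [hkeys'] at hy
          rcases (PySem.Set.mem_add seen.keys t y).1 hy with hy | rfl
          · exact (PySem.Set.mem_add s t y).2 (Or.inl (hmem y hy hyk))
          · exact (PySem.Set.mem_add s y y).2 (Or.inr rfl))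
      rw [hres, PySem.Set.update_cons]
    · intro hk
      rw [hw, pv_tgtW_append, PySem.Set.update_append]
      by_cases ht : t = k
      · subst ht
        have hchunk : PySem.Set.update s (pvTgtW t (pvW seen [] )) = s := rfl
        have hchunk2 : PySem.Set.update s (pvTgtW t (pvChunk seen t))
            = PySem.Set.update s seen.keys := by
          rw [pv_tgtW_chunk, show (t == t) = true from by simp]
          simp only [if_pos]
          have hnok : ∀ p ∈ seen.items, (p.1 == t) = false := by
            intro p hp
            simp only [beq_eq_false_iff_ne, ne_eq]
            intro h
            apply hk
            rw [← h, pv_keys_eq_items]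
            exact List.mem_map.2 ⟨p, hp, rfl⟩
          have h1 : seen.items.flatMap (fun p => (if p.1 == t then [t] else []) ++ [p.1])
              = seen.items.flatMap (fun p => [p.1]) :=
            List.flatMap_congr (fun p hp => by rw [hnok p hp]; simp)
          have h2 : ∀ ps : List (String × Int), ps.flatMap (fun p => [p.1]) = ps.map (·.1) := by
            intro ps
            induction ps with
            | nil => rfl
            | cons q qs ihq => rw [List.flatMap_cons, ihq]; rfl
          rw [h1, h2, ← pv_keys_eq_items]
        rw [hchunk2]
        have hres := (ih (seen.modify t 0 (· + 1)) (PySem.Set.update s seen.keys) hnd').1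
          (by rw [hkeys']; exact (PySem.Set.mem_add seen.keys t t).2 (Or.inr rfl))
          (by
            intro y hy hyk
            rw [hkeys'] at hy
            rcases (PySem.Set.mem_add seen.keys t y).1 hy with hy | rfl
            · exact (PySem.Set.mem_update s seen.keys y).2 (Or.inr hy)
            · exact absurd rfl hyk)
        rw [hres, if_pos (by simp), List.erase_cons_head]
      · have hchunk : PySem.Set.update s (pvTgtW k (pvChunk seen t)) = s := by
          rw [pv_tgtW_chunk, show (t == k) = false from by simp [ht]]
          simp only [if_neg Bool.false_ne_true, List.append_nil]
          rw [(pv_upd_ifflatP k t seen.items s).2 (by rw [← pv_keys_eq_items]; exact hk),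
              PySem.Set.update_nil]
        rw [hchunk]
        have hk' : k ∉ (seen.modify t 0 (· + 1)).keys := by
          rw [hkeys']
          intro hmem
          rcases (PySem.Set.mem_add seen.keys t k).1 hmem with h | rfl
          · exact hk h
          · exact ht rfl
        have hres := (ih (seen.modify t 0 (· + 1)) s hnd').2 hk'
        rw [hres, hkeys', pv_upd_addArg]
        by_cases hts : k ∈ ts
        · rw [if_pos hts, if_pos (by simp [hts]),
              List.erase_cons_tail (by simp [ht]), PySem.Set.update_cons]
        · rw [if_neg hts, if_neg (by
            intro hmem
            rcases List.mem_cons.1 hmem with rfl | h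
            · exact ht rfl
            · exact hts h)]

theorem pv_rowB_play (k : String) (ts : List String) (s : PySem.Set String) :
    PySem.Set.update s (pvTgtW k (pvW PySem.Dict.empty ts))
      = if k ∈ ts then PySem.Set.update s (ts.erase k) else s := by
  have h := (pv_rowB_main k ts PySem.Dict.empty s (by rw [PySem.Dict.keys_empty]; exact List.nodup_nil)).2
    (by rw [PySem.Dict.keys_empty]; simp)
  rw [h, PySem.Dict.keys_empty, PySem.Set.update_nil]


-- ---------- counts / weights ----------
theorem pv_cnt_map (k b : String) (L : List (String × String)) :
    (pvTgt k L).count b = pvCntE k b L := by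
  unfold pvTgt pvCntE
  rw [List.count_eq_countP, List.countP_map, List.countP_filter, List.countP_eq_length_filter]
  congr 1
  apply List.filter_congr
  intro e _
  simp only [Function.comp]
  exact Bool.and_comm _ _

theorem pv_cntE_append (k b : String) (X Y : List (String × String)) :
    pvCntE k b (X ++ Y) = pvCntE k b X + pvCntE k b Y := by
  unfold pvCntE; rw [List.filter_append, List.length_append]

theorem pv_wsum_append (k b : String) (X Y : List (String × String × Int)) :
    pvWsum k b (X ++ Y) = pvWsum k b X + pvWsum k b Y := by
  unfold pvWsum; rw [List.filter_append, List.map_append, List.sum_append]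

theorem pv_cnt_chunkE (k b t : String) (ts : List String) :
    pvCntE k b (ts.flatMap (fun y => [(t, y), (y, t)]))
      = (if t = k then ts.count b else 0) + (if t = b then ts.count k else 0) := by
  induction ts with
  | nil => simp [pvCntE, List.flatMap_nil]
  | cons y ts ih =>
    rw [List.flatMap_cons, pv_cntE_append, ih]
    have h2 : pvCntE k b [(t, y), (y, t)]
        = (if t = k ∧ y = b then 1 else 0) + (if y = k ∧ t = b then 1 else 0) := by
      by_cases h1 : t = k <;> by_cases h2 : y = b <;> by_cases h3 : y = k <;> by_cases h4 : t = b <;>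
        simp_all [pvCntE]
    rw [h2, List.count_cons, List.count_cons]
    by_cases h1 : t = k <;> by_cases h2 : y = b <;> by_cases h3 : y = k <;> by_cases h4 : t = b <;>
      simp_all <;> omega

theorem pv_filter_nodup (k : String) (L : List String) (h : L.Nodup) :
    L.filter (fun a => a == k) = if k ∈ L then [k] else [] := by
  induction L with
  | nil => simp
  | cons a L ih =>
    rw [List.filter_cons]
    rcases List.nodup_cons.1 h with ⟨ha, hL⟩
    by_cases hak : a = k
    · subst hak
      simp only [BEq.rfl, if_pos, List.mem_cons, true_or]
      rw [show L.filter (fun x => x == a) = [] from by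
            rw [List.filter_eq_nil_iff]; intro x hx; simp only [beq_iff_eq]; rintro rfl; exact ha hx]
    · rw [show (a == k) = false from by simp [hak]]
      simp only [Bool.false_eq_true, if_false]
      rw [ih hL]
      by_cases hk : k ∈ L
      · rw [if_pos hk, if_pos (by simp [hk])]
      · rw [if_neg hk, if_neg (by
          intro hm; rcases List.mem_cons.1 hm with rfl | hm
          · exact hak rfl
          · exact hk hm)]

theorem pv_items_sum (seen : PySem.Dict String Int) (k : String) (hnd : seen.keys.Nodup) :
    ((seen.items.filter (fun p => p.1 == k)).map (·.2)).sum = seen.getD k 0 := by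
  rw [PySem.Dict.items_eq_map_keys seen hnd 0, List.filter_map]
  have hcomp : ((fun p : String × Int => p.1 == k) ∘ (fun a => (a, seen.getD a 0)))
      = (fun a => a == k) := rfl
  rw [hcomp, pv_filter_nodup k seen.keys hnd]
  by_cases hk : k ∈ seen.keys
  · rw [if_pos hk]; simp
  · rw [if_neg hk]
    have : seen.contains k = false := by
      rw [← Bool.not_eq_true]
      intro hc
      exact hk ((PySem.Dict.contains_iff_mem_keys seen k).1 hc)
    rw [PySem.Dict.getD_of_not_contains seen 0 this]
    rfl

theorem pv_wsum_psflat (k b t : String) (ps : List (String × Int)) :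
    pvWsum k b (ps.flatMap (fun p => [(p.1, (t, p.2)), (t, (p.1, p.2))]))
      = (if t = b then ((ps.filter (fun p => p.1 == k)).map (·.2)).sum else 0)
        + (if t = k then ((ps.filter (fun p => p.1 == b)).map (·.2)).sum else 0) := by
  induction ps with
  | nil => simp [pvWsum, List.flatMap_nil]
  | cons p ps ih =>
    rw [List.flatMap_cons, pv_wsum_append, ih]
    have h2 : pvWsum k b [(p.1, (t, p.2)), (t, (p.1, p.2))]
        = (if p.1 = k ∧ t = b then p.2 else 0) + (if t = k ∧ p.1 = b then p.2 else 0) := by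
      by_cases h1 : p.1 = k <;> by_cases h3 : t = b <;> by_cases h4 : t = k <;> by_cases h5 : p.1 = b <;>
        simp_all [pvWsum]
    rw [h2, List.filter_cons, List.filter_cons]
    by_cases h1 : p.1 = k <;> by_cases h3 : t = b <;> by_cases h4 : t = k <;> by_cases h5 : p.1 = b <;>
      (simp_all; try ring)

theorem pv_cnt_chunkW (k b t : String) (seen : PySem.Dict String Int) (hnd : seen.keys.Nodup) :
    pvWsum k b (pvChunk seen t)
      = (if t = b then seen.getD k 0 else 0) + (if t = k then seen.getD b 0 else 0) := by
  unfold pvChunk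
  rw [pv_wsum_psflat, pv_items_sum seen k hnd, pv_items_sum seen b hnd]

theorem pv_cnt_W (k b : String) (ts : List String) :
    ∀ (seen : PySem.Dict String Int), seen.keys.Nodup →
    pvWsum k b (pvW seen ts)
      = seen.getD k 0 * (ts.count b : Int) + seen.getD b 0 * (ts.count k : Int)
        + (pvCntE k b (pvE ts) : Int) := by
  induction ts with
  | nil => intro seen _; simp [pvWsum, pvE, pvPairs, pvCntE, pvW]
  | cons t ts ih =>
    intro seen hnd
    rw [show pvW seen (t :: ts) = pvChunk seen t ++ pvW (seen.modify t 0 (· + 1)) ts from rfl,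
        pv_wsum_append, pv_cnt_chunkW k b t seen hnd,
        ih (seen.modify t 0 (· + 1)) (by
          rw [pv_keys_modify_add]; exact PySem.Set.nodup_add _ _ hnd),
        pv_pvE_cons, pv_cntE_append, pv_cnt_chunkE,
        PySem.Dict.getD_modify, PySem.Dict.getD_modify,
        List.count_cons, List.count_cons]
    clear ih hnd
    split_ifs with h1 h2 h3 h4 h5 h6 h7 h8 h9 h10 h11 h12
    all_goals try subst_vars
    all_goals try (push_cast; ring)
    all_goals simp_all

theorem pv_cnt_play (k b : String) (ts : List String) :
    pvWsum k b (pvW PySem.Dict.empty ts) = (pvCntE k b (pvE ts) : Int) := by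
  rw [pv_cnt_W k b ts PySem.Dict.empty (by rw [PySem.Dict.keys_empty]; exact List.nodup_nil),
      PySem.Dict.getD_empty, PySem.Dict.getD_empty]
  ring


-- ---------- lift the per-playlist facts over the whole playlist list ----------
theorem pv_glob_src (pls : List (List (String × List (List (String × String))))) :
    ∀ (s : PySem.Set String),
    PySem.Set.update s (pvSrc (pls.flatMap (fun pl => pvE (pvTracks pl))))
      = PySem.Set.update s (pvSrcW (pls.flatMap (fun pl => pvW PySem.Dict.empty (pvTracks pl)))) := by
  induction pls with
  | nil => intro s; rfl
  | cons pl pls ih =>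
    intro s
    rw [List.flatMap_cons, List.flatMap_cons]
    unfold pvSrc pvSrcW
    rw [List.map_append, List.map_append, PySem.Set.update_append, PySem.Set.update_append]
    have h1 := pv_src_play (pvTracks pl) s
    unfold pvSrc pvSrcW at h1
    rw [h1]
    exact ih _

theorem pv_glob_tgt (k : String) (pls : List (List (String × List (List (String × String))))) :
    ∀ (s : PySem.Set String),
    PySem.Set.update s (pvTgt k (pls.flatMap (fun pl => pvE (pvTracks pl))))
      = PySem.Set.update s (pvTgtW k (pls.flatMap (fun pl => pvW PySem.Dict.empty (pvTracks pl)))) := by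
  induction pls with
  | nil => intro s; rfl
  | cons pl pls ih =>
    intro s
    rw [List.flatMap_cons, List.flatMap_cons, pv_tgt_append, pv_tgtW_append,
        PySem.Set.update_append, PySem.Set.update_append,
        pv_rowA_play, pv_rowB_play]
    exact ih _

theorem pv_glob_cnt (k b : String) (pls : List (List (String × List (List (String × String))))) :
    (pvCntE k b (pls.flatMap (fun pl => pvE (pvTracks pl))) : Int)
      = pvWsum k b (pls.flatMap (fun pl => pvW PySem.Dict.empty (pvTracks pl))) := by
  induction pls with
  | nil => rfl
  | cons pl pls ih =>
    rw [List.flatMap_cons, List.flatMap_cons, pv_cntE_append, pv_wsum_append,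
        pv_cnt_play, ← ih]
    push_cast
    ring

theorem pv_wsum_qs (k b : String) (L : List (String × String × Int)) :
    (((pvQs k L).filter (fun q => q.1 == b)).map (·.2)).sum = pvWsum k b L := by
  unfold pvQs pvWsum
  rw [List.filter_map, List.map_map, List.filter_filter]
  have h : (fun (a : String × String × Int) => ((fun (q : String × Int) => q.1 == b) ∘ (fun x => x.2)) a && a.1 == k)
      = (fun (e : String × String × Int) => e.1 == k && e.2.1 == b) := by
    funext e
    simp only [Function.comp]
    exact Bool.and_comm _ _
  rw [h]
  rfl

theorem build_co_matrix_eq_alt (playlists : List (List (String × List (List (String × String))))) :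
    build_co_matrix playlists = build_co_matrix_alt playlists := by
  show ((playlists.foldl (fun co playlist =>
      (PySem.List.enumerate (pvTracks playlist) 0).foldl (fun co it =>
        (PySem.List.slice (pvTracks playlist) (some (it.1 + 1)) none).foldl (fun co t2 =>
          ((co.modify it.2 PySem.Dict.empty (fun c => c.modify t2 0 (· + 1))).modify
             t2 PySem.Dict.empty (fun c => c.modify it.2 0 (· + 1)))) co) co)
      PySem.Dict.empty).items.map (fun p => (p.1, p.2.items)))
    = ((playlists.foldl (fun co playlist =>
      (((PySem.Dict.mk playlist).getD "tracks" []).foldl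
        (fun (st : PySem.Dict String (PySem.Dict String Int) × PySem.Dict String Int) t =>
          let t2 := (PySem.Dict.mk t).getD "track_uri" ""
          (st.2.items.foldl (fun co p =>
              ((co.modify p.1 PySem.Dict.empty (fun c => c.modify t2 0 (· + p.2))).modify
                 t2 PySem.Dict.empty (fun c => c.modify p.1 0 (· + p.2)))) st.1,
           st.2.modify t2 0 (· + 1)))
        (co, PySem.Dict.empty)).1)
      PySem.Dict.empty).items.map (fun p => (p.1, p.2.items)))
  rw [pv_A_fold, pv_B_fold_all]
  set E := playlists.flatMap (fun pl => pvE (pvTracks pl)) with hE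
  set W := playlists.flatMap (fun pl => pvW PySem.Dict.empty (pvTracks pl)) with hW
  have hndE : (E.foldl pvStepE PySem.Dict.empty).keys.Nodup :=
    pv_nodupE E _ (by rw [PySem.Dict.keys_empty]; exact List.nodup_nil)
  have hndW : (W.foldl pvStepW PySem.Dict.empty).keys.Nodup :=
    pv_nodupW W _ (by rw [PySem.Dict.keys_empty]; exact List.nodup_nil)
  rw [PySem.Dict.items_eq_map_keys _ hndE PySem.Dict.empty,
      PySem.Dict.items_eq_map_keys _ hndW PySem.Dict.empty,
      List.map_map, List.map_map]
  have hkeys : (E.foldl pvStepE PySem.Dict.empty).keys = (W.foldl pvStepW PySem.Dict.empty).keys := by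
    rw [pv_keysE, pv_keysW, PySem.Dict.keys_empty]
    exact pv_glob_src playlists []
  rw [hkeys]
  apply List.map_congr_left
  intro k _
  simp only [Function.comp]
  congr 1
  rw [pv_getD_E, pv_getD_W, PySem.Dict.getD_empty]
  have hndA := pv_row1_nodup (pvTgt k E)
  have hndB := pv_row2_nodup (pvQs k W)
  rw [PySem.Dict.items_eq_map_keys _ hndA 0, PySem.Dict.items_eq_map_keys _ hndB 0,
      pv_row1_keys, pv_row2_keys]
  have hqk : (pvQs k W).map (·.1) = pvTgtW k W := rfl
  have hinner : PySem.Set.ofList (pvTgt k E) = PySem.Set.ofList ((pvQs k W).map (·.1)) := by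
    rw [hqk, ← PySem.Set.update_nil_left, ← PySem.Set.update_nil_left]
    exact pv_glob_tgt k playlists []
  rw [hinner]
  apply List.map_congr_left
  intro b _
  congr 1
  rw [pv_row1_getD, pv_row2_getD, PySem.Dict.getD_empty, pv_wsum_qs, pv_cnt_map, pv_glob_cnt]
  ring

-- ===== VERDICT (by name: the statement is the Claim_ definition above) =====
theorem build_co_matrix_spec : Claim_equal_build_co_matrix := by
  intro playlists _ _
  unfold Spec_build_co_matrix
  exact build_co_matrix_eq_alt playlists
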